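-- pv_equiv track=rewrite | github.com/monkeydg/POG-bot | bot/modules/interactive_stats.py | merge_loadout_ids
-- ===== SOURCE A (Python) =====
-- LOADOUT_IDS_DICT = {
--     "Infiltrator": [1, 8, 15],
--     "Light Assault": [3, 10, 17],
--     "Medic": [4, 11, 18],
--     "Engineer": [5, 12, 19],
--     "Heavy Assault": [6, 13, 20],
--     "Max": [7, 14, 21]
-- }
--
-- def merge_loadout_ids(unmerged_dict):
--     """
--     Given a dictionary with loadout ids as the key, it merges loadouts together
--     where the id represents the same loadout, and adds the values together
--     """
--     merged = {
--     "Infiltrator": 0,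
--     "Light Assault": 0,
--     "Medic": 0,
--     "Engineer": 0,
--     "Heavy Assault": 0,
--     "Max": 0
--     }
--
--     # as can be seen in loadout_ids_dict, there are some ids that correspond to the same loadout
--     # so we need to merge them.
--     for loadout_id in unmerged_dict:
--         for name in LOADOUT_IDS_DICT:
--             if loadout_id in LOADOUT_IDS_DICT[name]:
--                 merged[name] += unmerged_dict[loadout_id]
--
--     return merged
-- ===== SOURCE B (Python) =====
-- LOADOUT_IDS_DICT = {
--     "Infiltrator": [1, 8, 15],
--     "Light Assault": [3, 10, 17],
--     "Medic": [4, 11, 18],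
--     "Engineer": [5, 12, 19],
--     "Heavy Assault": [6, 13, 20],
--     "Max": [7, 14, 21]
-- }
--
-- # reverse mapping: loadout id -> class name, flattened once
-- ID_TO_NAME = {i: name for name, ids in LOADOUT_IDS_DICT.items() for i in ids}
--
-- def merge_loadout_ids(unmerged_dict):
--     merged = dict.fromkeys(LOADOUT_IDS_DICT, 0)
--     for loadout_id, value in unmerged_dict.items():
--         name = ID_TO_NAME.get(loadout_id)
--         if name is not None:
--             merged[name] += value
--     return merged
-- ===== Notes on version B (the rewrite author's own statement) =====
-- stated objective: simpler
-- what changed: Replaces the nested scan over the six classes (with a membership test and a re-lookup of the value in the input dict) by a single pass over the input items using a precomputed reverse id->class-name dictionary.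
import Mathlib
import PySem

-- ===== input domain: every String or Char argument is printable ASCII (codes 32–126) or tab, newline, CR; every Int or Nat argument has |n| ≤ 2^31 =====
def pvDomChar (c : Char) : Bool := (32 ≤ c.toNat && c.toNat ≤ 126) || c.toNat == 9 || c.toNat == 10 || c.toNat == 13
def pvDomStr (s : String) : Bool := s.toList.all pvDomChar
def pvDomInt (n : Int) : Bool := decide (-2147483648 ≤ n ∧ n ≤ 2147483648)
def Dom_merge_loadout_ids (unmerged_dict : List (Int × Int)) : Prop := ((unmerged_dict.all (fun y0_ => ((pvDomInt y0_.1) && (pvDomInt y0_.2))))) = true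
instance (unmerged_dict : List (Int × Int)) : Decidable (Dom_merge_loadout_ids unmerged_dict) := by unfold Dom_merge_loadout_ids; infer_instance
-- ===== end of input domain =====

-- B replaces A's nested 6-class scan (with a value re-lookup in the input dict) by one pass
-- over the input items through a precomputed reverse id→name dictionary (objective: simpler).

-- ===== PORT A =====
def LOADOUT_IDS_DICT : List (String × List Int) :=
  [("Infiltrator", [1, 8, 15]), ("Light Assault", [3, 10, 17]), ("Medic", [4, 11, 18]),
   ("Engineer", [5, 12, 19]), ("Heavy Assault", [6, 13, 20]), ("Max", [7, 14, 21])]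

-- merged = {…six names: 0…}
def pvMerged0 : PySem.Dict String Int :=
  PySem.Dict.ofList [("Infiltrator", 0), ("Light Assault", 0), ("Medic", 0),
                     ("Engineer", 0), ("Heavy Assault", 0), ("Max", 0)]

def merge_loadout_ids (unmerged_dict : List (Int × Int)) : List (String × Int) :=
  -- for loadout_id in unmerged_dict: for name in LOADOUT_IDS_DICT: if loadout_id in …
  (unmerged_dict.foldl (fun m p =>
      LOADOUT_IDS_DICT.foldl (fun m nl =>
        if p.1 ∈ nl.2 then
          m.modify nl.1 0 (· + ((PySem.Dict.mk unmerged_dict).get? p.1).getD 0)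
        else m) m) pvMerged0).items

-- ===== PORT B =====
-- ID_TO_NAME = {i: name for name, ids in LOADOUT_IDS_DICT.items() for i in ids}
def ID_TO_NAME : PySem.Dict Int String :=
  LOADOUT_IDS_DICT.foldl (fun d nl => nl.2.foldl (fun d i => d.insert i nl.1) d) PySem.Dict.empty

def merge_loadout_ids_alt (unmerged_dict : List (Int × Int)) : List (String × Int) :=
  (unmerged_dict.foldl (fun m p =>
      match ID_TO_NAME.get? p.1 with
      | some name => m.modify name 0 (· + p.2)
      | none => m) pvMerged0).items

-- ===== PRECONDITION & SPEC =====
-- Pre_ excludes association lists with duplicate keys: a Python dict cannot contain them,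
-- so A never sees such an input; on them A's whole-dict value re-lookup is accidental.
def Pre_merge_loadout_ids (unmerged_dict : List (Int × Int)) : Prop :=
  (unmerged_dict.map Prod.fst).Nodup
instance (unmerged_dict : List (Int × Int)) : Decidable (Pre_merge_loadout_ids unmerged_dict) := by
  unfold Pre_merge_loadout_ids; infer_instance

def pvWitness_merge_loadout_ids : (List (Int × Int)) := [(1, 5), (8, 3), (99, 7)]

def Spec_merge_loadout_ids (unmerged_dict : List (Int × Int)) (out : List (String × Int)) : Prop :=
  out = merge_loadout_ids_alt unmerged_dict
instance (unmerged_dict : List (Int × Int)) (out : List (String × Int)) : Decidable (Spec_merge_loadout_ids unmerged_dict out) := by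
  unfold Spec_merge_loadout_ids; infer_instance

-- ===== CLAIM (what is proved, stated in full; the proofs are below) =====
def Claim_equal_merge_loadout_ids : Prop := ∀ (unmerged_dict : List (Int × Int)), Dom_merge_loadout_ids unmerged_dict → Pre_merge_loadout_ids unmerged_dict → Spec_merge_loadout_ids unmerged_dict (merge_loadout_ids unmerged_dict)

-- ===== LEMMAS AND PROOFS =====

-- A's inner scan over the six classes, with the looked-up value abstracted as v,
-- equals B's single reverse lookup.
theorem step_eq (m : PySem.Dict String Int) (k v : Int) :
    LOADOUT_IDS_DICT.foldl (fun m nl => if k ∈ nl.2 then m.modify nl.1 0 (· + v) else m) m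
    = (match ID_TO_NAME.get? k with
       | some name => m.modify name 0 (· + v)
       | none => m) := by
  by_cases h : k ∈ ([1,8,15,3,10,17,4,11,18,5,12,19,6,13,20,7,14,21] : List Int)
  · simp only [List.mem_cons, List.not_mem_nil, or_false] at h
    rcases h with h|h|h|h|h|h|h|h|h|h|h|h|h|h|h|h|h|h <;> subst h <;> rfl
  · simp only [List.mem_cons, List.not_mem_nil, or_false, not_or] at h
    obtain ⟨h1,h2,h3,h4,h5,h6,h7,h8,h9,h10,h11,h12,h13,h14,h15,h16,h17,h18⟩ := h
    simp [LOADOUT_IDS_DICT, ID_TO_NAME, PySem.Dict.get?, PySem.Dict.empty, PySem.Dict.insert,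
      h1,h2,h3,h4,h5,h6,h7,h8,h9,h10,h11,h12,h13,h14,h15,h16,h17,h18,
      Ne.symm h1, Ne.symm h2, Ne.symm h3, Ne.symm h4, Ne.symm h5, Ne.symm h6,
      Ne.symm h7, Ne.symm h8, Ne.symm h9, Ne.symm h10, Ne.symm h11, Ne.symm h12,
      Ne.symm h13, Ne.symm h14, Ne.symm h15, Ne.symm h16, Ne.symm h17, Ne.symm h18]

-- ===== VERDICT (by name: the statement is the Claim_ definition above) =====
theorem merge_loadout_ids_spec : Claim_equal_merge_loadout_ids := by
  intro ud _ hpre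
  unfold Spec_merge_loadout_ids merge_loadout_ids merge_loadout_ids_alt
  congr 1
  apply PySem.List.foldl_congr_mem
  intro m p hp
  have hget : (PySem.Dict.mk ud).get? p.1 = some p.2 :=
    PySem.Dict.get?_of_mem_items (d := PySem.Dict.mk ud) (by exact hp) (by exact hpre)
  rw [step_eq _ p.1 _, hget]
  rfl
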